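-- pv_equiv track=rewrite | github.com/elargu/Course-IT-training | Python Unsam/2021/ejercicios entregados/clase 2/diccionario_geringoso.py | traductor
-- ===== SOURCE A (Python) =====
-- def traductor(palabra):
--     '''Traduce a geringoso una palabra dada'''
--     letras='aeiou'
--     geringado=''
--
--     for p in palabra:
--         flag=0
--         for gletra in letras:
--             if p==gletra:
--                 geringado+=gletra+'p'+gletra
--                 flag=1
--         if flag==0:
--             geringado+=p
--
--     return geringado
-- ===== SOURCE B (Python) =====
-- def traductor(palabra):
--     '''Traduce a geringoso una palabra dada'''
--     # Staged passes: one whole-string replace per vowel. Safe because each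
--     # expansion v+'p'+v introduces only 'p' and the vowel already processed.
--     for v in 'aeiou':
--         palabra = palabra.replace(v, v + 'p' + v)
--     return palabra
-- ===== Notes on version B (the rewrite author's own statement) =====
-- stated objective: idiomatic
-- what changed: Replaces A's single per-character scan with an inner per-vowel comparison loop and flag by five staged whole-string str.replace passes, one per vowel; measured faster by moving the character work into C-level str.replace.
import Mathlib
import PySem

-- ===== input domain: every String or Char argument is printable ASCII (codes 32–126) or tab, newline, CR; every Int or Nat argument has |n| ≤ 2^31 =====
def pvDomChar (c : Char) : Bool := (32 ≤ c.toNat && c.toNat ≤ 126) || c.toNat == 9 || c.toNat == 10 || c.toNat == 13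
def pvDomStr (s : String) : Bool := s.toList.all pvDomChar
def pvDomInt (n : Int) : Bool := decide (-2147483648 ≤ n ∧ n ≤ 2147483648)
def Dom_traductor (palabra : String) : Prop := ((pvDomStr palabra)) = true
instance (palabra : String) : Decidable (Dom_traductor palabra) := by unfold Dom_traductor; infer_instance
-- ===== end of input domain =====

-- B replaces A's per-character scan (inner vowel loop + flag) by five staged whole-string replace passes, one per vowel (idiomatic).

-- ===== PORT A =====
-- literal transliteration: outer loop over the word, inner loop over 'aeiou' with a flag
def traductorStep (ger : String) (p : Char) : String :=
  let st := "aeiou".toList.foldl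
    (fun (acc : String × Int) g =>
      if p = g then (acc.1 ++ String.ofList [g, 'p', g], 1) else acc)
    (ger, (0 : Int))
  if st.2 = 0 then st.1 ++ String.ofList [p] else st.1

def traductor (palabra : String) : String :=
  palabra.toList.foldl traductorStep ""

-- ===== PORT B =====
-- for v in 'aeiou': palabra = palabra.replace(v, v+'p'+v); return palabra
def traductor_alt (palabra : String) : String :=
  "aeiou".toList.foldl
    (fun s v => PySem.Str.replace s (String.ofList [v]) (String.ofList [v, 'p', v]))
    palabra

-- ===== PRECONDITION & SPEC =====
def Spec_traductor (palabra : String) (out : String) : Prop := out = traductor_alt palabra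
instance (palabra : String) (out : String) : Decidable (Spec_traductor palabra out) := by unfold Spec_traductor; infer_instance

-- ===== CLAIM (what is proved, stated in full; the proofs are below) =====
def Claim_equal_traductor : Prop := ∀ (palabra : String), Dom_traductor palabra → Spec_traductor palabra (traductor palabra)

-- ===== LEMMAS AND PROOFS =====

-- per-character substitution of a single vowel
def subst (v : Char) (c : Char) : List Char := if c = v then [v, 'p', v] else [c]

-- A's per-character table
def gtab (c : Char) : List Char :=
  if c = 'a' then ['a','p','a']
  else if c = 'e' then ['e','p','e']
  else if c = 'i' then ['i','p','i']
  else if c = 'o' then ['o','p','o']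
  else if c = 'u' then ['u','p','u']
  else [c]

theorem aeiou_toList : "aeiou".toList = ['a','e','i','o','u'] := by decide

-- A's step appends gtab p
theorem traductorStep_eq (ger : String) (p : Char) :
    traductorStep ger p = ger ++ String.ofList (gtab p) := by
  unfold traductorStep gtab
  rw [aeiou_toList]
  by_cases ha : p = 'a' <;> by_cases he : p = 'e' <;> by_cases hi : p = 'i' <;>
    by_cases ho : p = 'o' <;> by_cases hu : p = 'u' <;>
    simp_all [List.foldl]

theorem traductor_foldl (l : List Char) (ger : String) :
    l.foldl traductorStep ger = ger ++ String.ofList (l.flatMap gtab) := by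
  induction l generalizing ger with
  | nil => simp
  | cons c t ih =>
    simp [List.foldl, ih, traductorStep_eq, List.flatMap_cons, String.append_assoc,
      String.ofList_append]

-- single-character replace is the per-character substitution
theorem replace_go_single (o : Char) (n : List Char) (fuel : Nat) (l acc : List Char)
    (h : l.length ≤ fuel) :
    PySem.Chars.replace.go [o] n fuel l acc
      = acc.reverse ++ l.flatMap (fun c => if c = o then n else [c]) := by
  induction fuel generalizing l acc with
  | zero =>
    have : l = [] := List.length_eq_zero_iff.mp (Nat.le_zero.mp h)
    subst this
    simp [PySem.Chars.replace.go]
  | succ k ih =>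
    cases l with
    | nil => simp [PySem.Chars.replace.go]
    | cons c t =>
      simp only [PySem.Chars.replace.go]
      by_cases hc : c = o
      · subst hc
        have hpre : List.isPrefixOf [c] (c :: t) = true := by
          simp [List.isPrefixOf]
        rw [if_pos hpre]
        rw [ih _ _ (by simpa using Nat.succ_le_succ_iff.mp (by simpa using h))]
        simp
      · have hpre : List.isPrefixOf [o] (c :: t) = false := by
          simp [List.isPrefixOf]
          exact fun hh => hc hh.symm
        rw [if_neg (by simp [hpre])]
        rw [ih _ _ (by simpa using Nat.succ_le_succ_iff.mp (by simpa using h))]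
        simp [hc]

theorem replace_single (s : List Char) (o : Char) (n : List Char) :
    PySem.Chars.replace s [o] n = s.flatMap (fun c => if c = o then n else [c]) := by
  unfold PySem.Chars.replace
  rw [if_neg (by simp)]
  simpa using replace_go_single o n s.length s [] le_rfl

-- composing the five vowel substitutions equals gtab, character by character
theorem gtab_comp (c : Char) :
    ((((subst 'a' c).flatMap (subst 'e')).flatMap (subst 'i')).flatMap
        (subst 'o')).flatMap (subst 'u') = gtab c := by
  unfold subst gtab
  by_cases ha : c = 'a' <;> by_cases he : c = 'e' <;> by_cases hi : c = 'i' <;>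
    by_cases ho : c = 'o' <;> by_cases hu : c = 'u' <;>
    simp_all

theorem five_subst (l : List Char) :
    ((((l.flatMap (subst 'a')).flatMap (subst 'e')).flatMap (subst 'i')).flatMap
        (subst 'o')).flatMap (subst 'u') = l.flatMap gtab := by
  simp only [List.flatMap_assoc]
  exact List.flatMap_congr (fun c _ => by
    simpa [List.flatMap_assoc] using gtab_comp c)

theorem alt_toList (palabra : String) :
    (traductor_alt palabra).toList = palabra.toList.flatMap gtab := by
  unfold traductor_alt
  rw [aeiou_toList]
  simp only [List.foldl]
  rw [← five_subst]
  simp only [PySem.Str.toList_replace, String.toList_ofList, replace_single]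
  rfl

-- ===== VERDICT (by name: the statement is the Claim_ definition above) =====
theorem traductor_spec : Claim_equal_traductor := by
  intro palabra _
  unfold Spec_traductor
  have hA : (traductor palabra).toList = palabra.toList.flatMap gtab := by
    unfold traductor
    rw [traductor_foldl]
    simp
  apply String.toList_injective
  rw [hA, alt_toList]
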